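-- pv_equiv track=rewrite | github.com/the-omega-institute/automath | theory/2026_golden_ratio_driven_scan_projection_generation_recursive_emergence/scripts/exp_fence_scheduling_euler_volume_audit.py | fence_pred_masks
-- ===== SOURCE A (Python) =====
-- from typing import Dict, List
--
-- def fence_pred_masks(n: int) -> List[int]:
--     """Predecessor masks for Z_n on elements {0,...,n-1}."""
--     n = int(n)
--     pred = [0] * n
--     for i in range(0, n - 1):
--         a = i
--         b = i + 1
--         # In 1-based: if (i+1) is odd then (i+1) < (i+2), else (i+2) < (i+1).
--         if (i + 1) % 2 == 1:
--             # a < b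
--             pred[b] |= 1 << a
--         else:
--             # b < a
--             pred[a] |= 1 << b
--     return pred
-- ===== SOURCE B (Python) =====
-- def fence_pred_masks(n: int):
--     """Predecessor masks for Z_n on elements {0,...,n-1}.
--
--     Closed form per element: even elements have no predecessors; odd j is
--     covered by its even neighbours j-1 and (if present) j+1.
--     """
--     n = int(n)
--     return [((1 << (j - 1)) | ((1 << (j + 1)) if j + 1 < n else 0)) if j % 2 == 1 else 0
--             for j in range(n)]
-- ===== Notes on version B (the rewrite author's own statement) =====
-- stated objective: simpler
-- what changed: Replaces A's edge-by-edge mutating accumulation over range(n-1) with a single list comprehension computing each element's complete mask in closed form from its parity.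
import Mathlib
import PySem

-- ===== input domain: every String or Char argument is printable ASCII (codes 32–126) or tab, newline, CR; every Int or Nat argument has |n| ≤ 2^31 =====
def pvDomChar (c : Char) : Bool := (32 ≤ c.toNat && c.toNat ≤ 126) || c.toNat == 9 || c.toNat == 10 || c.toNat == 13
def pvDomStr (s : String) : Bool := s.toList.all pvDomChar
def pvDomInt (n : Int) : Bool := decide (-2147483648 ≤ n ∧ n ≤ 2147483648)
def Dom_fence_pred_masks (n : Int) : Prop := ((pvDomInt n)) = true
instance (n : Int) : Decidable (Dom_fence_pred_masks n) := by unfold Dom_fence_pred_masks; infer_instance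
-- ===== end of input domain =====

-- B replaces A's edge-by-edge mutating accumulation with one closed-form per-element pass (simpler).

-- ===== PORT A =====
-- loop body of A; 1 << a ported as 2 ^ a.toNat (exact: the shift amount is ≥ 0 here);
-- the reads pred[b]/pred[a] use pyGetD (the index is always in range in A).
def pvStepA (pred : List Int) (i : Int) : List Int :=
  if (i + 1) % 2 == 1 then
    pred.set (i + 1).toNat (PySem.Int.bor (PySem.List.pyGetD pred (i + 1) 0) ((2:Int) ^ i.toNat))
  else
    pred.set i.toNat (PySem.Int.bor (PySem.List.pyGetD pred i 0) ((2:Int) ^ (i + 1).toNat))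

def fence_pred_masks (n : Int) : List Int :=
  (PySem.List.pyRange 0 (n - 1) 1).foldl pvStepA (List.replicate n.toNat 0)

-- ===== PORT B =====
def fence_pred_masks_alt (n : Int) : List Int :=
  (PySem.List.pyRange 0 n 1).map (fun j =>
    if j % 2 == 1 then PySem.Int.bor ((2:Int) ^ (j - 1).toNat) (if j + 1 < n then (2:Int) ^ (j + 1).toNat else 0)
    else 0)

-- ===== PRECONDITION & SPEC =====
def Spec_fence_pred_masks (n : Int) (out : List Int) : Prop := out = fence_pred_masks_alt n
instance (n : Int) (out : List Int) : Decidable (Spec_fence_pred_masks n out) := by unfold Spec_fence_pred_masks; infer_instance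

-- ===== CLAIM (what is proved, stated in full; the proofs are below) =====
def Claim_equal_fence_pred_masks : Prop := ∀ (n : Int), Dom_fence_pred_masks n → Spec_fence_pred_masks n (fence_pred_masks n)

-- ===== LEMMAS AND PROOFS =====

-- the partial mask of element j after A has processed edges i = 0 .. k-1
def pvMask (k j : Nat) : Int :=
  PySem.Int.bor (if j % 2 = 1 ∧ j ≤ k then (2:Int) ^ (j - 1) else 0) (if j % 2 = 1 ∧ j < k then (2:Int) ^ (j + 1) else 0)

theorem pv_set_map_range (f : Nat → Int) (n t : Nat) (v : Int) :
    (List.map f (List.range n)).set t v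
      = List.map (fun j => if j = t then v else f j) (List.range n) := by
  apply List.ext_getElem
  · simp
  · intro i h1 h2
    simp only [List.length_set, List.length_map, List.length_range] at h1
    simp only [List.getElem_set, List.getElem_map, List.getElem_range]
    by_cases h : t = i
    · subst h
      simp
    · rw [if_neg h, if_neg (fun heq => h heq.symm)]

theorem pvStepA_mask (n' k : Nat) (hk : k + 1 < n') :
    pvStepA (List.map (pvMask k) (List.range n')) (k : Int)
      = List.map (pvMask (k + 1)) (List.range n') := by
  unfold pvStepA
  rcases Nat.even_or_odd k with hke | hko
  · obtain ⟨t, ht⟩ := hke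
    have hm : ((k : Int) + 1) % 2 = 1 := by omega
    have ht1 : ((k : Int) + 1).toNat = k + 1 := by omega
    have ht0 : (k : Int).toNat = k := by omega
    have hget : PySem.List.pyGetD (List.map (pvMask k) (List.range n')) ((k : Int) + 1) 0
        = pvMask k (k + 1) := by
      have hcast : ((k : Int) + 1) = ((k + 1 : Nat) : Int) := by push_cast; ring
      rw [hcast, PySem.List.pyGetD_natCast]
      simp [List.getD, hk]
    simp only [hm, beq_iff_eq, hget, ht1, ht0, pv_set_map_range]
    apply List.map_congr_left
    intro j hj
    by_cases hjt : j = k + 1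
    · subst hjt
      have : pvMask k (k + 1) = 0 := by
        unfold pvMask
        have h1 : ¬ ((k + 1) % 2 = 1 ∧ k + 1 ≤ k) := by omega
        have h2 : ¬ ((k + 1) % 2 = 1 ∧ k + 1 < k) := by omega
        simp [h1, h2]
      rw [if_pos rfl, this]
      unfold pvMask
      have h1 : (k + 1) % 2 = 1 ∧ k + 1 ≤ k + 1 := by omega
      have h2 : ¬ ((k + 1) % 2 = 1 ∧ k + 1 < k + 1) := by omega
      rw [if_pos h1, if_neg h2, PySem.Int.bor_comm]
      simp
    · rw [if_neg hjt]
      unfold pvMask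
      split_ifs <;> first | rfl | omega
  · obtain ⟨t, ht⟩ := hko
    have hm : ((k : Int) + 1) % 2 = 0 := by omega
    have hne : (((k : Int) + 1) % 2 == 1) = false := by simp [hm]
    have ht0 : (k : Int).toNat = k := by omega
    have ht1 : ((k : Int) + 1).toNat = k + 1 := by omega
    have hget : PySem.List.pyGetD (List.map (pvMask k) (List.range n')) (k : Int) 0
        = pvMask k k := by
      rw [PySem.List.pyGetD_natCast]
      simp [List.getD, show k < n' by omega]
    simp only [hne, Bool.false_eq_true, if_false, hget, ht0, ht1, pv_set_map_range]
    apply List.map_congr_left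
    intro j hj
    by_cases hjt : j = k
    · subst hjt
      have hv : pvMask j j = 2 ^ (j - 1) := by
        unfold pvMask
        have h1 : j % 2 = 1 ∧ j ≤ j := by omega
        have h2 : ¬ (j % 2 = 1 ∧ j < j) := by omega
        simp [h1, h2]
      rw [if_pos rfl, hv]
      unfold pvMask
      have h1 : j % 2 = 1 ∧ j ≤ j + 1 := by omega
      have h2 : j % 2 = 1 ∧ j < j + 1 := by omega
      simp [h1, h2]
    · rw [if_neg hjt]
      unfold pvMask
      split_ifs <;> first | rfl | omega

theorem pvFoldA (n' : Nat) (k : Nat) (hk : k + 1 ≤ n') :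
    ((List.range k).map (fun (j : Nat) => (j : Int))).foldl pvStepA (List.replicate n' 0)
      = List.map (pvMask k) (List.range n') := by
  induction k with
  | zero =>
      apply List.ext_getElem
      · simp
      · intro i h1 h2
        have h3 : ¬ (i % 2 = 1 ∧ i ≤ 0) := by omega
        have h4 : ¬ (i % 2 = 1 ∧ i < 0) := by omega
        simp only [List.range_zero, List.map_nil, List.foldl_nil, List.getElem_replicate,
          List.getElem_map, List.getElem_range]
        unfold pvMask
        rw [if_neg h3, if_neg h4]
        simp
  | succ k ih =>
      rw [List.range_succ, List.map_append, List.foldl_append, ih (by omega)]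
      simp only [List.map_cons, List.map_nil, List.foldl_cons, List.foldl_nil]
      exact pvStepA_mask n' k (by omega)

theorem pv_final : ∀ (n : Int), fence_pred_masks n = fence_pred_masks_alt n := by
  intro n
  unfold fence_pred_masks fence_pred_masks_alt
  by_cases hn : n ≤ 0
  · have h0 : n.toNat = 0 := by omega
    rw [PySem.List.pyRange_one_eq_nil (show n - 1 ≤ 0 by omega),
      PySem.List.pyRange_one_eq_nil (show n ≤ 0 by omega), h0]
    simp
  · have hn : 0 < n := by omega
    rw [PySem.List.pyRange_one, PySem.List.pyRange_one]
    simp only [zero_add, sub_zero]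
    rw [pvFoldA n.toNat (n - 1).toNat (by omega)]
    apply List.ext_getElem
    · simp
    · intro i h1 h2
      simp only [List.getElem_map, List.getElem_range]
      simp only [List.length_map, List.length_range] at h1
      unfold pvMask
      by_cases hp : i % 2 = 1
      · have hc : ((i : Int) % 2) = 1 := by omega
        have e1 : ((i : Int) - 1).toNat = i - 1 := by omega
        have e2 : ((i : Int) + 1).toNat = i + 1 := by omega
        have ha : i % 2 = 1 ∧ i ≤ (n - 1).toNat := ⟨hp, by omega⟩
        simp only [hc, beq_self_eq_true, if_true, e1, e2, if_pos ha]
        by_cases hb : (i : Int) + 1 < n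
        · have hb' : i % 2 = 1 ∧ i < (n - 1).toNat := ⟨hp, by omega⟩
          have hb2 : i < n.toNat - 1 := by omega
          simp [hb, hb', hb2]
        · have hb' : ¬ (i % 2 = 1 ∧ i < (n - 1).toNat) := by omega
          have hb2 : ¬ i < n.toNat - 1 := by omega
          simp [hb, hb', hb2]
      · have hc : ((i : Int) % 2 == 1) = false := by
          simp only [beq_eq_false_iff_ne, ne_eq]
          omega
        have h3 : ¬ (i % 2 = 1 ∧ i ≤ (n - 1).toNat) := by omega
        have h4 : ¬ (i % 2 = 1 ∧ i < (n - 1).toNat) := by omega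
        have h3' : ¬ (i % 2 = 1 ∧ i ≤ n.toNat - 1) := by omega
        have h4' : ¬ (i % 2 = 1 ∧ i < n.toNat - 1) := by omega
        simp [hc, h4, h3', h4']

-- ===== VERDICT (by name: the statement is the Claim_ definition above) =====
theorem fence_pred_masks_spec : Claim_equal_fence_pred_masks := by
  intro n _
  unfold Spec_fence_pred_masks
  exact pv_final n
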